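-- pv_equiv track=rewrite | github.com/Nghia03092004/nghia03092004.github.io | project_euler/problem_886/solution.py | permanent_mod
-- ===== SOURCE A (Python) =====
-- def permanent_mod(A, mod):
--     """
--     Compute permanent of matrix A modulo mod using Ryser's formula.
--     For n=34 this is 2^34 ~ 1.7*10^10 iterations - too slow in Python.
--     We need a smarter approach.
--     """
--     n = len(A)
--     # Use Ryser's formula with Gray code
--     row_sum = [0] * n
--     result = 0
--     sign = 1
--
--     total = 1 << n
--     old_gray = 0
--
--     for idx in range(1, total):
--         gray = idx ^ (idx >> 1)
--         diff = old_gray ^ gray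
--         j = diff.bit_length() - 1
--
--         if gray & (1 << j):  # adding column j
--             for i in range(n):
--                 row_sum[i] += A[i][j]
--             sign = mod - sign
--         else:  # removing column j
--             for i in range(n):
--                 row_sum[i] -= A[i][j]
--             sign = mod - sign
--
--         old_gray = gray
--
--         prod = sign
--         zero = False
--         for i in range(n):
--             rs = row_sum[i] % mod
--             if rs == 0:
--                 zero = True
--                 break
--             prod = prod * rs % mod
--
--         if not zero:
--             result = (result + prod) % mod
--
--     if n % 2 == 1:
--         result = (mod - result) % mod
--
--     return result
-- ===== SOURCE B (Python) =====
-- def permanent_mod(A, mod):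
--     """Ryser's formula, stateless: iterate over all non-empty column subsets
--     directly (no Gray code, no maintained row-sum array)."""
--     n = len(A)
--     result = 0
--     for mask in range(1, 1 << n):
--         cols = [j for j in range(n) if (mask >> j) & 1]
--         prod = 1
--         for row in A:
--             prod = prod * (sum(row[j] for j in cols) % mod) % mod
--         if len(cols) % 2 == 1:
--             prod = -prod
--         result = (result + prod) % mod
--     if n % 2 == 1:
--         result = (mod - result) % mod
--     return result
-- ===== Notes on version B (the rewrite author's own statement) =====
-- stated objective: simpler
-- what changed: Replaces A's Gray-code enumeration with its incrementally maintained row_sum array, per-step sign flipping and zero-break by a stateless loop that enumerates column-subset bitmasks 1..2^n-1 directly, recomputes every row sum from scratch for each mask, and signs the product by the popcount parity of the mask.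
import Mathlib
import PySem

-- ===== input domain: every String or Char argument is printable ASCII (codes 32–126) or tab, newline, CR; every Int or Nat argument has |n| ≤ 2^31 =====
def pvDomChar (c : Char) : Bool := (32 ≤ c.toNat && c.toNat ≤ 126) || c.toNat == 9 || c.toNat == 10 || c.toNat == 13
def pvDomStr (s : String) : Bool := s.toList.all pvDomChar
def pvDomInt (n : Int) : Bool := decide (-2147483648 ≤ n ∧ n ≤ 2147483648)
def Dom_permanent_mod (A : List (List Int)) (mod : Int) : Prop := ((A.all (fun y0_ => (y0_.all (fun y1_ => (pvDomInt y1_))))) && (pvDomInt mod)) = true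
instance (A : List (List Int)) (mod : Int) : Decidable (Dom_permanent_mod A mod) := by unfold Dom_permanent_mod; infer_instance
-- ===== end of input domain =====

-- B replaces A's Gray-code/incremental-row-sum Ryser loop by a stateless direct
-- enumeration of column subsets (recomputing row sums per mask); objective: simpler.


-- ===== PORT A =====
-- Gray-code Ryser loop; Python's `%` is PySem.Int.mod, `x.bit_length()` is
-- PySem.Int.bitLength, the in-place row_sum[i] ±= … loops are set-folds over range n,
-- the inner `break` is the usual boolean flag. List indexing uses getD defaults that
-- are never reached under Pre_ (rows of length ≥ n, so every A[i][j] is in range).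
def permanent_mod (A : List (List Int)) (mod : Int) : Int :=
  let n := A.length
  let total := 1 <<< n
  let final := (List.range' 1 (total - 1)).foldl
    (fun (st : List Int × Int × Int × Nat) idx =>
      let row_sum := st.1
      let result := st.2.1
      let sign := st.2.2.1
      let old_gray := st.2.2.2
      let gray := idx ^^^ (idx >>> 1)
      let diff := old_gray ^^^ gray
      let j := PySem.Int.bitLength (diff : Int) - 1
      let rsSign : List Int × Int :=
        if gray &&& (1 <<< j) ≠ 0 then
          ((List.range n).foldl (fun rs i => rs.set i (rs.getD i 0 + (A.getD i []).getD j 0)) row_sum,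
           mod - sign)
        else
          ((List.range n).foldl (fun rs i => rs.set i (rs.getD i 0 - (A.getD i []).getD j 0)) row_sum,
           mod - sign)
      let row_sum' := rsSign.1
      let sign' := rsSign.2
      let pz := (List.range n).foldl
        (fun (pz : Int × Bool) i =>
          if pz.2 then pz
          else
            let rs := PySem.Int.mod (row_sum'.getD i 0) mod
            if rs = 0 then (pz.1, true) else (PySem.Int.mod (pz.1 * rs) mod, false))
        (sign', false)
      let result' := if pz.2 then result else PySem.Int.mod (result + pz.1) mod
      (row_sum', result', sign', gray))
    (List.replicate n 0, 0, 1, 0)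
  let result := final.2.1
  if n % 2 = 1 then PySem.Int.mod (mod - result) mod else result

-- ===== PORT B =====
-- direct subset enumeration (Source B): for each mask collect its columns, recompute
-- every row sum from scratch, multiply the modded row sums, sign by |cols| parity.
def permanent_mod_alt (A : List (List Int)) (mod : Int) : Int :=
  let n := A.length
  let result := (List.range' 1 (1 <<< n - 1)).foldl
    (fun result mask =>
      let cols := (List.range n).filter (fun j => decide ((mask >>> j) &&& 1 = 1))
      let prod := A.foldl
        (fun p row => PySem.Int.mod (p * PySem.Int.mod (cols.foldl (fun s j => s + row.getD j 0) 0) mod) mod) 1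
      let prod := if cols.length % 2 = 1 then -prod else prod
      PySem.Int.mod (result + prod) mod) 0
  if n % 2 = 1 then PySem.Int.mod (mod - result) mod else result

-- ===== PRECONDITION & SPEC =====
-- Pre_ excludes exactly the inputs where Python A raises: mod = 0 with at least one row
-- (ZeroDivisionError at `row_sum[i] % mod`), and any row shorter than len(A)
-- (IndexError at `A[i][j]`, since every column index below n is eventually visited).
def Pre_permanent_mod (A : List (List Int)) (mod : Int) : Prop :=
  (A = [] ∨ mod ≠ 0) ∧ ∀ row ∈ A, A.length ≤ row.length
instance (A : List (List Int)) (mod : Int) : Decidable (Pre_permanent_mod A mod) := by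
  unfold Pre_permanent_mod; infer_instance
def pvWitness_permanent_mod : List (List Int) × Int := ([[1, 2], [3, 4]], 7)
def Spec_permanent_mod (A : List (List Int)) (mod : Int) (out : Int) : Prop := out = permanent_mod_alt A mod
instance (A : List (List Int)) (mod : Int) (out : Int) : Decidable (Spec_permanent_mod A mod out) := by unfold Spec_permanent_mod; infer_instance

-- ===== CLAIM (what is proved, stated in full; the proofs are below) =====
def Claim_equal_permanent_mod : Prop := ∀ (A : List (List Int)) (mod : Int), Dom_permanent_mod A mod → Pre_permanent_mod A mod → Spec_permanent_mod A mod (permanent_mod A mod)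

-- ===== LEMMAS AND PROOFS =====

theorem pv_mod_congr (m a b : Int) (hm : m ≠ 0) (h : m ∣ a - b) :
    PySem.Int.mod a m = PySem.Int.mod b m := by
  have ha := PySem.Int.floordiv_mul_add_mod a m
  have hb := PySem.Int.floordiv_mul_add_mod b m
  obtain ⟨c, hc⟩ := h
  have hd : m ∣ PySem.Int.mod a m - PySem.Int.mod b m := by
    refine ⟨c - PySem.Int.floordiv a m + PySem.Int.floordiv b m, ?_⟩
    linarith [ha, hb, hc]
  have hz : PySem.Int.mod a m - PySem.Int.mod b m = 0 := by
    apply Int.eq_zero_of_abs_lt_dvd ((abs_dvd m _).mpr hd)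
    rcases lt_or_gt_of_ne hm with hneg | hpos
    · have b1 := PySem.Int.mod_neg_bounds a hneg
      have b2 := PySem.Int.mod_neg_bounds b hneg
      rw [abs_of_neg hneg]; rw [abs_lt]; constructor <;> linarith
    · have b1 := PySem.Int.mod_nonneg a hpos
      have b2 := PySem.Int.mod_nonneg b hpos
      have b3 := PySem.Int.mod_lt a hpos
      have b4 := PySem.Int.mod_lt b hpos
      rw [abs_of_pos hpos]; rw [abs_lt]; constructor <;> linarith
  linarith

theorem pv_mod_zero (m : Int) : PySem.Int.mod 0 m = 0 := Int.zero_fmod m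

theorem pv_dvd_mod_sub (m a : Int) : m ∣ PySem.Int.mod a m - a := by
  have ha := PySem.Int.floordiv_mul_add_mod a m
  exact ⟨-(PySem.Int.floordiv a m), by linarith⟩

def gB (i : Nat) : Nat := i ^^^ (i >>> 1)

theorem pv_g_xor (a b : Nat) : gB a ^^^ gB b = gB (a ^^^ b) := by
  unfold gB
  rw [Nat.shiftRight_xor_distrib]
  rw [Nat.xor_assoc, Nat.xor_comm (a >>> 1), Nat.xor_assoc, Nat.xor_comm (b >>> 1), Nat.xor_assoc]

theorem pv_g_inj (a b : Nat) (h : gB a = gB b) : a = b := by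
  have h2 : (a ^^^ b) = (a ^^^ b) >>> 1 := by
    have : gB a ^^^ gB b = 0 := by rw [h]; simp
    rw [pv_g_xor] at this
    unfold gB at this
    -- (a^^^b) ^^^ (a^^^b)>>>1 = 0
    have := Nat.xor_eq_zero.mp this
    omega
  have h3 : a ^^^ b = 0 := by
    have hh : (a ^^^ b) >>> 1 = (a ^^^ b) / 2 := by simp [Nat.shiftRight_eq_div_pow]
    omega
  exact Nat.xor_eq_zero.mp h3

theorem pv_g_lt (n i : Nat) (h : i < 2 ^ n) : gB i < 2 ^ n := by
  unfold gB
  apply Nat.xor_lt_two_pow h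
  have : i >>> 1 ≤ i := by simp [Nat.shiftRight_eq_div_pow]; omega
  omega

theorem pv_xor_succ (k : Nat) : ∃ t, k ^^^ (k + 1) = 2 ^ (t + 1) - 1 := by
  induction k using Nat.strong_induction_on with
  | _ k ih =>
    rcases Nat.even_or_odd k with ⟨a, hk⟩ | ⟨a, hk⟩
    · refine ⟨0, ?_⟩
      subst hk
      apply Nat.eq_of_testBit_eq
      intro i
      cases i with
      | zero => simp [Nat.testBit_zero]; omega
      | succ s =>
        simp only [Nat.testBit_add_one, Nat.xor_div_two]
        have h1 : (a + a) / 2 = a := by omega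
        have h2 : (a + a + 1) / 2 = a := by omega
        rw [h1, h2]
        simp
    · obtain ⟨t, ht⟩ := ih a (by omega)
      refine ⟨t + 1, ?_⟩
      have key : k ^^^ (k + 1) = 2 * (a ^^^ (a + 1)) + 1 := by
        subst hk
        apply Nat.eq_of_testBit_eq
        intro i
        cases i with
        | zero => simp [Nat.testBit_xor, Nat.testBit_zero]; omega
        | succ s =>
          simp only [Nat.testBit_add_one, Nat.xor_div_two]
          have h1 : (2 * a + 1) / 2 = a := by omega
          have h2 : (2 * a + 1 + 1) / 2 = a + 1 := by omega
          have h3 : (2 * (a ^^^ (a + 1)) + 1) / 2 = a ^^^ (a + 1) := by omega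
          rw [h1, h2, h3]
      rw [key, ht]
      have : 0 < 2 ^ (t + 1) := Nat.two_pow_pos _
      rw [pow_succ]
      omega

theorem pv_g_ones (t : Nat) : gB (2 ^ (t + 1) - 1) = 2 ^ t := by
  unfold gB
  have hp : 0 < 2 ^ t := Nat.two_pow_pos _
  have h1 : (2 ^ (t + 1) - 1) >>> 1 = 2 ^ t - 1 := by
    simp [Nat.shiftRight_eq_div_pow]
    rw [pow_succ]
    omega
  rw [h1]
  apply Nat.eq_of_testBit_eq
  intro i
  rw [Nat.testBit_xor, Nat.testBit_two_pow_sub_one, Nat.testBit_two_pow_sub_one, Nat.testBit_two_pow]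
  rcases Nat.lt_trichotomy i t with h | h | h
  · simp [h, Nat.lt_succ_of_lt h, Nat.ne_of_gt h]
  · subst h; simp
  · simp [Nat.not_lt.mpr (Nat.le_of_lt h), Nat.not_lt.mpr (Nat.succ_le_of_lt h), Nat.ne_of_lt h]

theorem pv_bitLen_pow (t : Nat) : PySem.Int.bitLength ((2 ^ t : Nat) : Int) = t + 1 := by
  have hne : ((2 ^ t : Nat) : Int) ≠ 0 := by positivity
  have h1 := PySem.Int.lt_two_pow_bitLength ((2 ^ t : Nat) : Int)
  have h2 := PySem.Int.two_pow_bitLength_le ((2 ^ t : Nat) : Int) hne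
  rw [Int.natAbs_natCast] at h1 h2
  set bl := PySem.Int.bitLength ((2 ^ t : Nat) : Int) with hbl
  have hblpos : 1 ≤ bl := by
    have hp := Nat.two_pow_pos t
    by_contra hc
    have hb0 : bl = 0 := by omega
    rw [hb0, pow_zero] at h1
    omega
  have ht : t < bl := (Nat.pow_lt_pow_iff_right (by norm_num)).mp h1
  have ht2 : bl - 1 ≤ t := (Nat.pow_le_pow_iff_right (by norm_num)).mp h2
  omega

theorem pv_grayStep (n k : Nat) (h : k + 1 < 2 ^ n) :
    ∃ j, j < n ∧ gB (k + 1) = gB k ^^^ (1 <<< j) ∧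
      PySem.Int.bitLength (((gB k ^^^ gB (k + 1)) : Nat) : Int) - 1 = j := by
  obtain ⟨t, ht⟩ := pv_xor_succ k
  have hdiff : gB k ^^^ gB (k + 1) = 2 ^ t := by
    rw [pv_g_xor, ht, pv_g_ones]
  refine ⟨t, ?_, ?_, ?_⟩
  · -- 2 ^ t < 2 ^ n since it's the xor of two values < 2 ^ n
    have h1 : gB k < 2 ^ n := pv_g_lt n k (by omega)
    have h2 : gB (k + 1) < 2 ^ n := pv_g_lt n (k + 1) h
    have h3 : gB k ^^^ gB (k + 1) < 2 ^ n := Nat.xor_lt_two_pow h1 h2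
    rw [hdiff] at h3
    exact (Nat.pow_lt_pow_iff_right (by norm_num)).mp h3
  · have : gB k ^^^ (gB k ^^^ gB (k + 1)) = gB (k + 1) := by
      rw [← Nat.xor_assoc]; simp
    rw [hdiff] at this
    rw [← this, Nat.one_shiftLeft]
  · rw [hdiff, pv_bitLen_pow]
    omega

def colsOf (n mask : Nat) : List Nat := (List.range n).filter (fun j => decide ((mask >>> j) &&& 1 = 1))
def rsumOf (row : List Int) (n mask : Nat) : Int := (colsOf n mask).foldl (fun s j => s + row.getD j 0) 0
def epsOf (n mask : Nat) : Int := if (colsOf n mask).length % 2 = 1 then -1 else 1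

theorem pv_pred_testBit (mask i : Nat) : (decide ((mask >>> i) &&& 1 = 1)) = Nat.testBit mask i := by
  simp only [Nat.shiftRight_eq_div_pow, Nat.and_one_is_mod, Nat.testBit, Nat.one_and_eq_mod_two,
    Nat.mod_two_bne_zero]
  rcases Nat.mod_two_eq_zero_or_one (mask / 2 ^ i) with h | h <;> simp [h]

theorem pv_testBit_flip (mask j i : Nat) :
    Nat.testBit (mask ^^^ (1 <<< j)) i = if i = j then !(Nat.testBit mask j) else Nat.testBit mask i := by
  rw [Nat.one_shiftLeft, Nat.testBit_xor, Nat.testBit_two_pow]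
  rcases eq_or_ne i j with h | h
  · subst h; simp
  · simp [h, Ne.symm h]

theorem pv_cols_split (n mask j : Nat) (hj : j < n) :
    colsOf n mask =
      ((List.range' 0 j).filter (fun i => decide ((mask >>> i) &&& 1 = 1)) ++
        ((if Nat.testBit mask j then [j] else []) ++
        (List.range' (j + 1) (n - (j + 1))).filter (fun i => decide ((mask >>> i) &&& 1 = 1)))) := by
  unfold colsOf
  rw [List.range_eq_range']
  have hsplit : List.range' 0 n = List.range' 0 j ++ List.range' j (n - j) := by
    have := List.range'_append (s := 0) (m := j) (n := n - j) (step := 1)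
    simp at this
    rw [this]
    congr 1
    omega
  rw [hsplit, List.filter_append]
  congr 1
  have hone : n - j = (n - (j+1)) + 1 := by omega
  rw [hone, List.range'_succ, List.filter_cons]
  rw [pv_pred_testBit]
  rcases h : Nat.testBit mask j <;> simp [h]

theorem pv_rsum_flip (row : List Int) (n mask j : Nat) (hj : j < n) :
    rsumOf row n (mask ^^^ (1 <<< j)) =
      rsumOf row n mask + (if Nat.testBit mask j then -(row.getD j 0) else row.getD j 0) := by
  unfold rsumOf
  rw [PySem.List.foldl_add, PySem.List.foldl_add]
  rw [pv_cols_split n mask j hj, pv_cols_split n (mask ^^^ (1 <<< j)) j hj]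
  have houter1 : ∀ i ∈ List.range' 0 j,
      (decide (((mask ^^^ (1 <<< j)) >>> i) &&& 1 = 1)) = (decide ((mask >>> i) &&& 1 = 1)) := by
    intro i hi
    rw [pv_pred_testBit, pv_pred_testBit, pv_testBit_flip]
    have : i < j := by rw [List.mem_range'] at hi; omega
    simp [Nat.ne_of_lt this]
  have houter2 : ∀ i ∈ List.range' (j + 1) (n - (j + 1)),
      (decide (((mask ^^^ (1 <<< j)) >>> i) &&& 1 = 1)) = (decide ((mask >>> i) &&& 1 = 1)) := by
    intro i hi
    rw [pv_pred_testBit, pv_pred_testBit, pv_testBit_flip]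
    have : j + 1 ≤ i := by rw [List.mem_range'] at hi; omega
    simp [show i ≠ j by omega]
  rw [List.filter_congr houter1, List.filter_congr houter2]
  rw [pv_testBit_flip]
  simp only [if_pos rfl]
  rcases h : Nat.testBit mask j <;> simp [h, List.map_append, List.sum_append] <;> ring

theorem pv_parity_flip (n mask j : Nat) (hj : j < n) :
    (colsOf n (mask ^^^ (1 <<< j))).length % 2 = ((colsOf n mask).length + 1) % 2 := by
  rw [pv_cols_split n mask j hj, pv_cols_split n (mask ^^^ (1 <<< j)) j hj]
  have houter1 : ∀ i ∈ List.range' 0 j,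
      (decide (((mask ^^^ (1 <<< j)) >>> i) &&& 1 = 1)) = (decide ((mask >>> i) &&& 1 = 1)) := by
    intro i hi
    rw [pv_pred_testBit, pv_pred_testBit, pv_testBit_flip]
    have : i < j := by rw [List.mem_range'] at hi; omega
    simp [Nat.ne_of_lt this]
  have houter2 : ∀ i ∈ List.range' (j + 1) (n - (j + 1)),
      (decide (((mask ^^^ (1 <<< j)) >>> i) &&& 1 = 1)) = (decide ((mask >>> i) &&& 1 = 1)) := by
    intro i hi
    rw [pv_pred_testBit, pv_pred_testBit, pv_testBit_flip]
    have : j + 1 ≤ i := by rw [List.mem_range'] at hi; omega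
    simp [show i ≠ j by omega]
  rw [List.filter_congr houter1, List.filter_congr houter2]
  rw [pv_testBit_flip]
  simp only [if_pos rfl]
  rcases h : Nat.testBit mask j <;> simp [h, List.length_append] <;> omega

theorem pv_g_zero : gB 0 = 0 := rfl

theorem pv_cols_zero (n : Nat) : colsOf n 0 = [] := by
  unfold colsOf
  apply List.filter_eq_nil_iff.mpr
  intro a ha
  simp

theorem pv_parity_g (n k : Nat) (h : k < 2 ^ n) :
    (colsOf n (gB k)).length % 2 = k % 2 := by
  induction k with
  | zero => rw [pv_g_zero, pv_cols_zero]; simp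
  | succ k ih =>
    obtain ⟨j, hj, hstep, _⟩ := pv_grayStep n k h
    rw [hstep, pv_parity_flip n (gB k) j hj]
    have hi := ih (by omega)
    omega

theorem pv_foldl_set_range (u : Nat → Int → Int) (k : Nat) (rs : List Int) (h : k ≤ rs.length) :
    (List.range k).foldl (fun rs i => rs.set i (u i (rs.getD i 0))) rs
      = (List.range k).map (fun i => u i (rs.getD i 0)) ++ rs.drop k := by
  induction k with
  | zero => simp
  | succ k ih =>
    rw [List.range_succ, List.foldl_append, List.map_append, ih (by omega)]
    simp only [List.foldl_cons, List.foldl_nil, List.map_cons, List.map_nil]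
    set M := (List.range k).map (fun i => u i (rs.getD i 0)) with hM
    have hlen : M.length = k := by simp [hM]
    have hklt : k < rs.length := by omega
    have hdrop : rs.drop k = rs[k] :: rs.drop (k + 1) := List.drop_eq_getElem_cons hklt
    rw [hdrop]
    have e1 : (M ++ rs[k] :: rs.drop (k + 1)).getD k 0 = rs.getD k 0 := by
      rw [List.getD_append_right _ _ _ _ (by omega), hlen]
      simp
    rw [e1, List.set_append_right _ _ (by omega), hlen, Nat.sub_self, List.set_cons_zero]
    simp

theorem pv_map_getD_range (xs : List Int) :
    (List.range xs.length).map (fun i => xs.getD i 0) = xs := by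
  apply List.ext_getElem
  · simp
  · intro i h1 h2
    simp at h1 ⊢
    rw [List.getElem?_eq_getElem (by simpa using h1)]
    rfl

theorem pv_foldl_read_range {γ : Type} (h : γ → Int → γ) (a : γ) (xs : List Int) :
    (List.range xs.length).foldl (fun acc i => h acc (xs.getD i 0)) a = xs.foldl h a := by
  conv_rhs => rw [← pv_map_getD_range xs]
  rw [List.foldl_map]

def bstep (m : Int) (pz : Int × Bool) (x : Int) : Int × Bool :=
  if pz.2 then pz
  else
    let r := PySem.Int.mod x m
    if r = 0 then (pz.1, true) else (PySem.Int.mod (pz.1 * r) m, false)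

theorem pv_bstep_nonzero (m : Int) (xs : List Int) (s : Int)
    (h : ∀ x ∈ xs, PySem.Int.mod x m ≠ 0) :
    xs.foldl (bstep m) (s, false)
      = (xs.foldl (fun p x => PySem.Int.mod (p * PySem.Int.mod x m) m) s, false) := by
  induction xs generalizing s with
  | nil => simp
  | cons x t ih =>
    have hx : PySem.Int.mod x m ≠ 0 := h x (by simp)
    simp only [List.foldl_cons, bstep]
    simp [hx]
    exact ih _ (fun y hy => h y (by simp [hy]))

theorem pv_bstep_absorb (m : Int) (xs : List Int) (p : Int) :
    xs.foldl (bstep m) (p, true) = (p, true) := by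
  induction xs generalizing p with
  | nil => simp
  | cons x t ih => simp only [List.foldl_cons, bstep]; simpa using ih p

theorem pv_bstep_zero (m : Int) (xs : List Int) (s : Int)
    (h : ∃ x ∈ xs, PySem.Int.mod x m = 0) :
    (xs.foldl (bstep m) (s, false)).2 = true := by
  induction xs generalizing s with
  | nil => simp at h
  | cons x t ih =>
    simp only [List.foldl_cons, bstep]
    by_cases hx : PySem.Int.mod x m = 0
    · simp [hx, pv_bstep_absorb]
    · simp only [hx]
      simp
      apply ih
      rcases h with ⟨y, hy, hy0⟩
      rw [List.mem_cons] at hy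
      rcases hy with hy | hy
      · exact absurd (hy ▸ hy0) hx
      · exact ⟨y, hy, hy0⟩

theorem pv_foldl_modmul (m : Int) (hm : m ≠ 0) (xs : List Int) (s : Int) (hxs : xs ≠ []) :
    xs.foldl (fun p x => PySem.Int.mod (p * x) m) s = PySem.Int.mod (s * xs.prod) m := by
  induction xs generalizing s with
  | nil => simp at hxs
  | cons x t ih =>
    by_cases ht : t = []
    · subst ht; simp
    · simp only [List.foldl_cons]
      rw [ih _ ht]
      apply pv_mod_congr m _ _ hm
      obtain ⟨c, hc⟩ := pv_dvd_mod_sub m (s * x)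
      refine ⟨c * t.prod, ?_⟩
      rw [List.prod_cons]
      linear_combination t.prod * hc

theorem pv_g_pos (i : Nat) (hi : 1 ≤ i) : 1 ≤ gB i := by
  rcases Nat.eq_zero_or_pos (gB i) with h0 | h
  · have : i = 0 := pv_g_inj i 0 (by rw [h0, pv_g_zero])
    omega
  · exact h

theorem pv_perm (n : Nat) :
    ((List.range' 1 (2 ^ n - 1)).map gB).Perm (List.range' 1 (2 ^ n - 1)) := by
  have hinj : Function.Injective gB := fun a b h => pv_g_inj a b h
  have hnd : ((List.range' 1 (2 ^ n - 1)).map gB).Nodup :=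
    (List.nodup_range' 1 (by norm_num)).map (f := gB) hinj
  have hsub : ((List.range' 1 (2 ^ n - 1)).map gB) ⊆ List.range' 1 (2 ^ n - 1) := by
    intro x hx
    rw [List.mem_map] at hx
    obtain ⟨i, hi, rfl⟩ := hx
    rw [List.mem_range'_1] at hi ⊢
    have hp := Nat.two_pow_pos n
    constructor
    · exact pv_g_pos i hi.1
    · have := pv_g_lt n i (by omega)
      omega
  have hsp := List.subperm_of_subset hnd hsub
  exact hsp.perm_of_length_le (by simp)

def facOf (m : Int) (n mask : Nat) (row : List Int) : Int := PySem.Int.mod (rsumOf row n mask) m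
def prodOf (Am : List (List Int)) (m : Int) (n mask : Nat) : Int := (Am.map (facOf m n mask)).prod
def termOf (Am : List (List Int)) (m : Int) (n mask : Nat) : Int := epsOf n mask * prodOf Am m n mask
def SsumOf (Am : List (List Int)) (m : Int) (n : Nat) (l : List Nat) : Int := (l.map (termOf Am m n)).sum

theorem pv_mod_add_right (m a b : Int) (hm : m ≠ 0) :
    PySem.Int.mod (a + PySem.Int.mod b m) m = PySem.Int.mod (a + b) m := by
  apply pv_mod_congr m _ _ hm
  obtain ⟨c, hc⟩ := pv_dvd_mod_sub m b
  exact ⟨c, by linarith⟩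

theorem pv_mod_add_left (m a b : Int) (hm : m ≠ 0) :
    PySem.Int.mod (PySem.Int.mod a m + b) m = PySem.Int.mod (a + b) m := by
  apply pv_mod_congr m _ _ hm
  obtain ⟨c, hc⟩ := pv_dvd_mod_sub m a
  exact ⟨c, by linarith⟩

theorem pv_Ssum_concat (Am : List (List Int)) (m : Int) (n : Nat) (l : List Nat) (x : Nat) :
    SsumOf Am m n (l ++ [x]) = SsumOf Am m n l + termOf Am m n x := by
  simp [SsumOf]

theorem pv_rowsum_add (A : List (List Int)) (j mask : Nat) (hj : j < A.length)
    (hb : Nat.testBit mask j = false) :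
    (List.range A.length).map (fun i =>
        (A.map (fun row => rsumOf row A.length mask)).getD i 0 + (A.getD i []).getD j 0)
      = A.map (fun row => rsumOf row A.length (mask ^^^ (1 <<< j))) := by
  apply List.ext_getElem (by simp)
  intro i h1 h2
  simp only [List.getElem_map, List.getElem_range]
  have hi : i < A.length := by simpa using h1
  rw [List.getD_eq_getElem _ _ (by simpa using hi), List.getElem_map]
  rw [List.getD_eq_getElem _ _ hi]
  rw [pv_rsum_flip _ _ _ _ hj, hb]
  simp

theorem pv_rowsum_sub (A : List (List Int)) (j mask : Nat) (hj : j < A.length)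
    (hb : Nat.testBit mask j = true) :
    (List.range A.length).map (fun i =>
        (A.map (fun row => rsumOf row A.length mask)).getD i 0 - (A.getD i []).getD j 0)
      = A.map (fun row => rsumOf row A.length (mask ^^^ (1 <<< j))) := by
  apply List.ext_getElem (by simp)
  intro i h1 h2
  simp only [List.getElem_map, List.getElem_range]
  have hi : i < A.length := by simpa using h1
  rw [List.getD_eq_getElem _ _ (by simpa using hi), List.getElem_map]
  rw [List.getD_eq_getElem _ _ hi]
  rw [pv_rsum_flip _ _ _ _ hj, hb]
  simp
  ring

theorem pv_setfold_add (A : List (List Int)) (j : Nat) (rs : List Int) (h : A.length ≤ rs.length) :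
    (List.range A.length).foldl (fun rs i => rs.set i (rs.getD i 0 + (A.getD i []).getD j 0)) rs
      = (List.range A.length).map (fun i => rs.getD i 0 + (A.getD i []).getD j 0) ++ rs.drop A.length :=
  pv_foldl_set_range (fun i x => x + (A.getD i []).getD j 0) A.length rs h

theorem pv_setfold_sub (A : List (List Int)) (j : Nat) (rs : List Int) (h : A.length ≤ rs.length) :
    (List.range A.length).foldl (fun rs i => rs.set i (rs.getD i 0 - (A.getD i []).getD j 0)) rs
      = (List.range A.length).map (fun i => rs.getD i 0 - (A.getD i []).getD j 0) ++ rs.drop A.length :=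
  pv_foldl_set_range (fun i x => x - (A.getD i []).getD j 0) A.length rs h

theorem pv_pz_read (m : Int) (xs : List Int) (n : Nat) (hn : n = xs.length) (s : Int) :
    (List.range n).foldl (fun (pz : Int × Bool) i =>
       if pz.2 then pz else
         let rs := PySem.Int.mod (xs.getD i 0) m
         if rs = 0 then (pz.1, true) else (PySem.Int.mod (pz.1 * rs) m, false)) (s, false)
      = xs.foldl (bstep m) (s, false) := by
  subst hn
  exact pv_foldl_read_range (bstep m) (s, false) xs

theorem pv_modmul_inner (m : Int) (hm : m ≠ 0) (xs : List Int) (s : Int) (hxs : xs ≠ []) :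
    xs.foldl (fun p x => PySem.Int.mod (p * PySem.Int.mod x m) m) s
      = PySem.Int.mod (s * (xs.map (fun x => PySem.Int.mod x m)).prod) m := by
  have h := pv_foldl_modmul m hm (xs.map (fun x => PySem.Int.mod x m)) s (by simpa using hxs)
  rw [List.foldl_map] at h
  exact h

theorem pv_indA (A : List (List Int)) (m : Int) (hm : m ≠ 0) (k : Nat)
    (hk : k < 2 ^ A.length) :
    (List.range' 1 k).foldl
      (fun (st : List Int × Int × Int × Nat) idx =>
        let row_sum := st.1
        let result := st.2.1
        let sign := st.2.2.1
        let old_gray := st.2.2.2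
        let gray := idx ^^^ (idx >>> 1)
        let diff := old_gray ^^^ gray
        let j := PySem.Int.bitLength (diff : Int) - 1
        let rsSign : List Int × Int :=
          if gray &&& (1 <<< j) ≠ 0 then
            ((List.range A.length).foldl (fun rs i => rs.set i (rs.getD i 0 + (A.getD i []).getD j 0)) row_sum,
             m - sign)
          else
            ((List.range A.length).foldl (fun rs i => rs.set i (rs.getD i 0 - (A.getD i []).getD j 0)) row_sum,
             m - sign)
        let row_sum' := rsSign.1
        let sign' := rsSign.2
        let pz := (List.range A.length).foldl
          (fun (pz : Int × Bool) i =>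
            if pz.2 then pz
            else
              let rs := PySem.Int.mod (row_sum'.getD i 0) m
              if rs = 0 then (pz.1, true) else (PySem.Int.mod (pz.1 * rs) m, false))
          (sign', false)
        let result' := if pz.2 then result else PySem.Int.mod (result + pz.1) m
        (row_sum', result', sign', gray))
      (List.replicate A.length 0, 0, 1, 0)
      = (A.map (fun row => rsumOf row A.length (gB k)),
         PySem.Int.mod (SsumOf A m A.length ((List.range' 1 k).map gB)) m,
         (if k % 2 = 0 then (1 : Int) else m - 1),
         gB k) := by
  induction k with
  | zero =>
    have hmap : A.map (fun row => rsumOf row A.length (gB 0)) = List.replicate A.length (0 : Int) := by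
      have hf : (fun row : List Int => rsumOf row A.length (gB 0)) = fun _ => (0 : Int) := by
        funext row
        rw [pv_g_zero]
        unfold rsumOf
        rw [pv_cols_zero]
        rfl
      rw [hf, List.map_const']
    rw [List.range'_zero, List.foldl_nil, hmap]
    simp [SsumOf, pv_mod_zero, pv_g_zero]
  | succ k ih =>
    rw [List.range'_1_concat, List.foldl_append, ih (by omega)]
    simp only [List.foldl_cons, List.foldl_nil]
    have h1k : 1 + k = k + 1 := Nat.add_comm 1 k
    rw [h1k]
    obtain ⟨j, hj, hstep, hjdef⟩ := pv_grayStep A.length k hk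
    rw [show (k + 1) ^^^ ((k + 1) >>> 1) = gB (k + 1) from rfl]
    rw [hjdef]
    have hsign : (m - if k % 2 = 0 then (1 : Int) else m - 1)
        = (if (k + 1) % 2 = 0 then (1 : Int) else m - 1) := by
      rcases Nat.mod_two_eq_zero_or_one k with h | h
      · rw [if_pos h, if_neg (by omega)]
      · rw [if_neg (by omega), if_pos (by omega)]
        ring
    rw [hsign]
    have hbit : Nat.testBit (gB (k + 1)) j = !(Nat.testBit (gB k) j) := by
      rw [hstep, pv_testBit_flip]
      simp
    rcases hb : Nat.testBit (gB k) j with _ | _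
    · -- bit was clear: adding column j
      rw [hb] at hbit
      have hcond : gB (k + 1) &&& 1 <<< j ≠ 0 := by
        rw [Nat.one_shiftLeft, Nat.and_two_pow, hbit]
        simp
      rw [if_pos hcond]
      dsimp only
      rw [pv_setfold_add A j _ (by simp)]
      have hdrop0 : (List.map (fun row => rsumOf row A.length (gB k)) A).drop A.length = [] := by simp
      rw [hdrop0, List.append_nil, pv_rowsum_add A j (gB k) hj hb, ← hstep]
      rw [pv_pz_read m (List.map (fun row => rsumOf row A.length (gB (k + 1))) A) A.length (by simp) _]
      by_cases hz : ∃ row ∈ A, facOf m A.length (gB (k + 1)) row = 0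
      · obtain ⟨row, hr, h0⟩ := hz
        have hx : ∃ x ∈ List.map (fun row => rsumOf row A.length (gB (k + 1))) A,
            PySem.Int.mod x m = 0 := ⟨rsumOf row A.length (gB (k + 1)), List.mem_map_of_mem hr, h0⟩
        have hsnd := pv_bstep_zero m _ (if (k + 1) % 2 = 0 then (1 : Int) else m - 1) hx
        rw [if_pos hsnd]
        refine congrArg₂ Prod.mk rfl (congrArg₂ Prod.mk ?_ rfl)
        rw [List.map_append, List.map_singleton, pv_Ssum_concat]
        have hprod : prodOf A m A.length (gB (k + 1)) = 0 := by
          apply List.prod_eq_zero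
          rw [← h0]
          exact List.mem_map_of_mem hr
        unfold termOf
        rw [hprod, mul_zero, add_zero]
      · push_neg at hz
        have hxs : ∀ x ∈ List.map (fun row => rsumOf row A.length (gB (k + 1))) A,
            PySem.Int.mod x m ≠ 0 := by
          intro x hx
          obtain ⟨row, hr, rfl⟩ := List.mem_map.mp hx
          exact hz row hr
        rw [pv_bstep_nonzero m _ _ hxs]
        have hA : A ≠ [] := by
          intro h0
          rw [h0] at hk
          simp at hk
        rw [if_neg (by simp)]
        refine congrArg₂ Prod.mk rfl (congrArg₂ Prod.mk ?_ rfl)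
        rw [pv_modmul_inner m hm _ _ (by simpa using hA)]
        have hmm : (List.map (fun row => rsumOf row A.length (gB (k + 1))) A).map
              (fun x => PySem.Int.mod x m) = A.map (facOf m A.length (gB (k + 1))) := by
          rw [List.map_map]
          rfl
        rw [hmm]
        rw [pv_mod_add_left _ _ _ hm, pv_mod_add_right _ _ _ hm]
        rw [List.map_append, List.map_singleton, pv_Ssum_concat]
        have hpar := pv_parity_g A.length (k + 1) hk
        unfold termOf epsOf prodOf
        rw [hpar]
        rcases Nat.mod_two_eq_zero_or_one k with h | h
        · have h2 : (k + 1) % 2 = 1 := by omega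
          rw [if_neg (by omega), if_pos h2]
          apply pv_mod_congr m _ _ hm
          exact ⟨(A.map (facOf m A.length (gB (k + 1)))).prod, by ring⟩
        · have h2 : (k + 1) % 2 = 0 := by omega
          rw [if_pos h2, if_neg (by omega)]
    · -- bit was set: removing column j
      rw [hb] at hbit
      have hcond : ¬ (gB (k + 1) &&& 1 <<< j ≠ 0) := by
        rw [Nat.one_shiftLeft, Nat.and_two_pow, hbit]
        simp
      rw [if_neg hcond]
      dsimp only
      rw [pv_setfold_sub A j _ (by simp)]
      have hdrop0 : (List.map (fun row => rsumOf row A.length (gB k)) A).drop A.length = [] := by simp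
      rw [hdrop0, List.append_nil, pv_rowsum_sub A j (gB k) hj hb, ← hstep]
      rw [pv_pz_read m (List.map (fun row => rsumOf row A.length (gB (k + 1))) A) A.length (by simp) _]
      by_cases hz : ∃ row ∈ A, facOf m A.length (gB (k + 1)) row = 0
      · obtain ⟨row, hr, h0⟩ := hz
        have hx : ∃ x ∈ List.map (fun row => rsumOf row A.length (gB (k + 1))) A,
            PySem.Int.mod x m = 0 := ⟨rsumOf row A.length (gB (k + 1)), List.mem_map_of_mem hr, h0⟩
        have hsnd := pv_bstep_zero m _ (if (k + 1) % 2 = 0 then (1 : Int) else m - 1) hx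
        rw [if_pos hsnd]
        refine congrArg₂ Prod.mk rfl (congrArg₂ Prod.mk ?_ rfl)
        rw [List.map_append, List.map_singleton, pv_Ssum_concat]
        have hprod : prodOf A m A.length (gB (k + 1)) = 0 := by
          apply List.prod_eq_zero
          rw [← h0]
          exact List.mem_map_of_mem hr
        unfold termOf
        rw [hprod, mul_zero, add_zero]
      · push_neg at hz
        have hxs : ∀ x ∈ List.map (fun row => rsumOf row A.length (gB (k + 1))) A,
            PySem.Int.mod x m ≠ 0 := by
          intro x hx
          obtain ⟨row, hr, rfl⟩ := List.mem_map.mp hx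
          exact hz row hr
        rw [pv_bstep_nonzero m _ _ hxs]
        have hA : A ≠ [] := by
          intro h0
          rw [h0] at hk
          simp at hk
        rw [if_neg (by simp)]
        refine congrArg₂ Prod.mk rfl (congrArg₂ Prod.mk ?_ rfl)
        rw [pv_modmul_inner m hm _ _ (by simpa using hA)]
        have hmm : (List.map (fun row => rsumOf row A.length (gB (k + 1))) A).map
              (fun x => PySem.Int.mod x m) = A.map (facOf m A.length (gB (k + 1))) := by
          rw [List.map_map]
          rfl
        rw [hmm]
        rw [pv_mod_add_left _ _ _ hm, pv_mod_add_right _ _ _ hm]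
        rw [List.map_append, List.map_singleton, pv_Ssum_concat]
        have hpar := pv_parity_g A.length (k + 1) hk
        unfold termOf epsOf prodOf
        rw [hpar]
        rcases Nat.mod_two_eq_zero_or_one k with h | h
        · have h2 : (k + 1) % 2 = 1 := by omega
          rw [if_neg (by omega), if_pos h2]
          apply pv_mod_congr m _ _ hm
          exact ⟨(A.map (facOf m A.length (gB (k + 1)))).prod, by ring⟩
        · have h2 : (k + 1) % 2 = 0 := by omega
          rw [if_pos h2, if_neg (by omega)]

theorem pv_rowprod (m : Int) (hm : m ≠ 0) (A : List (List Int)) (hA : A ≠ []) (mask : Nat) :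
    A.foldl (fun p row => PySem.Int.mod (p * PySem.Int.mod
        (((List.range A.length).filter (fun j => decide ((mask >>> j) &&& 1 = 1))).foldl
          (fun s j => s + row.getD j 0) 0) m) m) 1
      = PySem.Int.mod (prodOf A m A.length mask) m := by
  have h := pv_foldl_modmul m hm (A.map (facOf m A.length mask)) 1 (by simpa using hA)
  rw [List.foldl_map, one_mul] at h
  simpa [facOf, rsumOf, colsOf] using h

theorem pv_indB (A : List (List Int)) (m : Int) (hm : m ≠ 0) (hA : A ≠ [])
    (l : List Nat) (S : Int) :
    l.foldl
      (fun result mask =>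
        let cols := (List.range A.length).filter (fun j => decide ((mask >>> j) &&& 1 = 1))
        let prod := A.foldl
          (fun p row => PySem.Int.mod (p * PySem.Int.mod (cols.foldl (fun s j => s + row.getD j 0) 0) m) m) 1
        let prod := if cols.length % 2 = 1 then -prod else prod
        PySem.Int.mod (result + prod) m)
      (PySem.Int.mod S m)
      = PySem.Int.mod (S + SsumOf A m A.length l) m := by
  induction l generalizing S with
  | nil => simp [SsumOf]
  | cons x t ih =>
    rw [List.foldl_cons]
    dsimp only
    rw [pv_rowprod m hm A hA x]
    rw [ih]
    have hc : SsumOf A m A.length (x :: t) = termOf A m A.length x + SsumOf A m A.length t := by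
      simp [SsumOf]
    rw [hc]
    apply pv_mod_congr m _ _ hm
    obtain ⟨c1, h1⟩ := pv_dvd_mod_sub m S
    obtain ⟨c2, h2⟩ := pv_dvd_mod_sub m (prodOf A m A.length x)
    unfold termOf epsOf colsOf
    split_ifs with hpar
    · exact ⟨c1 - c2, by linarith⟩
    · exact ⟨c1 + c2, by linarith⟩

-- ===== VERDICT (by name: the statement is the Claim_ definition above) =====
theorem permanent_mod_spec : Claim_equal_permanent_mod := by
  intro A m hdom hpre
  rcases hpre with ⟨hz, hrows⟩
  show permanent_mod A m = permanent_mod_alt A m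
  by_cases hA : A = []
  · subst hA
    rfl
  · have hm : m ≠ 0 := by
      rcases hz with h | h
      · exact absurd h hA
      · exact h
    unfold permanent_mod permanent_mod_alt
    dsimp only
    rw [Nat.one_shiftLeft]
    have hklt : 2 ^ A.length - 1 < 2 ^ A.length := by
      have := Nat.two_pow_pos A.length
      omega
    rw [pv_indA A m hm (2 ^ A.length - 1) hklt]
    have hB := pv_indB A m hm hA (List.range' 1 (2 ^ A.length - 1)) 0
    rw [pv_mod_zero] at hB
    rw [hB, zero_add]
    have hsum : SsumOf A m A.length ((List.range' 1 (2 ^ A.length - 1)).map gB)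
        = SsumOf A m A.length (List.range' 1 (2 ^ A.length - 1)) := by
      unfold SsumOf
      exact List.Perm.sum_eq ((pv_perm A.length).map (termOf A m A.length))
    rw [hsum]
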